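-- pv_equiv track=rewrite | github.com/adityasengar/photo-curation-pipeline | vertex_ranked_photo_improver2.py | aspect_ratio_string
-- ===== SOURCE A (Python) =====
-- def aspect_ratio_string(size: tuple[int, int]) -> str:
--     width, height = size
--     if width <= 0 or height <= 0:
--         return "1:1"
--
--     def gcd(a: int, b: int) -> int:
--         while b:
--             a, b = b, a % b
--         return a
--
--     divisor = gcd(width, height)
--     return f"{width // divisor}:{height // divisor}"
-- ===== SOURCE B (Python) =====
-- def aspect_ratio_string(size: tuple[int, int]) -> str:
--     width, height = size
--     if width <= 0 or height <= 0:
--         return "1:1"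
--
--     def gcd(a: int, b: int) -> int:
--         # binary (Stein) GCD: halve out common factors of 2, then the
--         # single-loop parity/subtraction reduction until a == b
--         k = 0
--         while a % 2 == 0 and b % 2 == 0:
--             a //= 2
--             b //= 2
--             k += 1
--         while a != b:
--             if a % 2 == 0:
--                 a //= 2
--             elif b % 2 == 0:
--                 b //= 2
--             elif a > b:
--                 a = (a - b) // 2
--             else:
--                 b = (b - a) // 2
--         return a * 2 ** k
--
--     divisor = gcd(width, height)
--     return f"{width // divisor}:{height // divisor}"
-- ===== Notes on version B (the rewrite author's own statement) =====
-- stated objective: alternative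
-- what changed: Replaces A's iterative Euclidean (modulo) gcd loop with a binary (Stein) gcd: a loop halving out common factors of two followed by a parity/halving/subtraction loop; the positivity guard and the output format are unchanged.
import Mathlib
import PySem

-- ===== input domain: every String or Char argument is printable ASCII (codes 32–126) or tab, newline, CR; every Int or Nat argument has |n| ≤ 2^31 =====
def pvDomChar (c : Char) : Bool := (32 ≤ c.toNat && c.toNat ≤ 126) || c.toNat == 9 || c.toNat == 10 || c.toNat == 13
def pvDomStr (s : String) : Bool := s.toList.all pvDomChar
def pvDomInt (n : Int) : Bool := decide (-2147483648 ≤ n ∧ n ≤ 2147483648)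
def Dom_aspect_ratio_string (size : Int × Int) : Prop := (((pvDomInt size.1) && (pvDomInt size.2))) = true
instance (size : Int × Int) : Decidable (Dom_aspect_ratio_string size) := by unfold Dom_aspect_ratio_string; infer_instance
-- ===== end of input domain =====

-- B replaces A's iterative Euclidean (modulo) gcd with a binary (Stein) gcd: halve out common
-- factors of two, then a parity/halving/subtraction loop; guard and output format are unchanged.
-- Objective: alternative algorithm, same result; no speed claim.


-- ===== PORT A =====
-- termination fact for A's `while b:` loop (cited in decreasing_by)
theorem pvModNatAbsLt (a b : Int) (hb : b ≠ 0) : (PySem.Int.mod a b).natAbs < b.natAbs := by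
  rcases lt_or_gt_of_ne hb with h | h
  · have := PySem.Int.mod_neg_bounds a h
    omega
  · have h1 := PySem.Int.mod_nonneg a h
    have h2 := PySem.Int.mod_lt a h
    omega

-- A's inner `gcd`: `while b: a, b = b, a % b; return a`
def pvGcdA (a b : Int) : Int :=
  if hb : b ≠ 0 then pvGcdA b (PySem.Int.mod a b) else a
termination_by b.natAbs
decreasing_by exact pvModNatAbsLt a b hb

def aspect_ratio_string (size : Int × Int) : String :=
  let width := size.1
  let height := size.2
  if width ≤ 0 ∨ height ≤ 0 then "1:1"
  else
    let divisor := pvGcdA width height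
    PySem.Int.toStr (PySem.Int.floordiv width divisor) ++ ":"
      ++ PySem.Int.toStr (PySem.Int.floordiv height divisor)

-- ===== PORT B =====
-- B's first loop: `while a % 2 == 0 and b % 2 == 0: a //= 2; b //= 2; k += 1` (fuel makes it total)
def pvGcdBShift (fuel : Nat) (a b : Int) (k : Nat) : Int × Int × Nat :=
  match fuel with
  | 0 => (a, b, k)
  | f + 1 =>
    if PySem.Int.mod a 2 = 0 ∧ PySem.Int.mod b 2 = 0 then
      pvGcdBShift f (PySem.Int.floordiv a 2) (PySem.Int.floordiv b 2) (k + 1)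
    else (a, b, k)

-- B's main loop: `while a != b: …` with the four parity/subtraction branches (fuel makes it total)
def pvGcdBLoop (fuel : Nat) (a b : Int) : Int :=
  match fuel with
  | 0 => a
  | f + 1 =>
    if a ≠ b then
      if PySem.Int.mod a 2 = 0 then pvGcdBLoop f (PySem.Int.floordiv a 2) b
      else if PySem.Int.mod b 2 = 0 then pvGcdBLoop f a (PySem.Int.floordiv b 2)
      else if a > b then pvGcdBLoop f (PySem.Int.floordiv (a - b) 2) b
      else pvGcdBLoop f a (PySem.Int.floordiv (b - a) 2)
    else a

-- B's inner `gcd`: binary (Stein) gcd, `return a * 2 ** k`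
def pvGcdB (a b : Int) : Int :=
  let s := pvGcdBShift (a.natAbs + b.natAbs) a b 0
  pvGcdBLoop (s.1.natAbs + s.2.1.natAbs) s.1 s.2.1 * 2 ^ s.2.2

def aspect_ratio_string_alt (size : Int × Int) : String :=
  let width := size.1
  let height := size.2
  if width ≤ 0 ∨ height ≤ 0 then "1:1"
  else
    let divisor := pvGcdB width height
    PySem.Int.toStr (PySem.Int.floordiv width divisor) ++ ":"
      ++ PySem.Int.toStr (PySem.Int.floordiv height divisor)

-- ===== PRECONDITION & SPEC =====
def Spec_aspect_ratio_string (size : Int × Int) (out : String) : Prop := out = aspect_ratio_string_alt size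
instance (size : Int × Int) (out : String) : Decidable (Spec_aspect_ratio_string size out) := by unfold Spec_aspect_ratio_string; infer_instance

-- ===== CLAIM (what is proved, stated in full; the proofs are below) =====
def Claim_equal_aspect_ratio_string : Prop := ∀ (size : Int × Int), Dom_aspect_ratio_string size → Spec_aspect_ratio_string size (aspect_ratio_string size)

-- ===== LEMMAS AND PROOFS =====

-- Nat.gcd absorbs a factor 2 on the left argument when the right is odd
theorem pvGcdOddCancelLeft (m n : Nat) (h : Nat.Coprime 2 n) :
    Nat.gcd (2 * m) n = Nat.gcd m n := Nat.gcd_mul_right_left_of_gcd_eq_one h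

theorem pvCoprimeTwoOfNotDvd (n : Int) (h : ¬ (2 ∣ n)) : Nat.Coprime 2 n.natAbs := by
  rw [Nat.coprime_two_left, Nat.odd_iff]; omega

-- A's Euclidean loop computes the gcd (loop invariant: a > 0, b ≥ 0)
theorem pvGcdA_eq (a b : Int) (ha : 0 < a) (hb : 0 ≤ b) : pvGcdA a b = (Int.gcd a b : Int) := by
  induction a, b using pvGcdA.induct with
  | case1 a b hbne ih =>
    have hbpos : 0 < b := lt_of_le_of_ne hb (Ne.symm hbne)
    rw [pvGcdA, dif_pos hbne]
    have hmn : 0 ≤ PySem.Int.mod a b := PySem.Int.mod_nonneg a hbpos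
    rw [ih hbpos hmn, @PySem.Int.mod_eq_emod_of_pos a b hbpos]
    have hm : (a % b).natAbs = a.natAbs % b.natAbs := Int.natAbs_emod_of_nonneg ha.le b
    simp only [Int.gcd, hm]
    rw [Nat.gcd_comm, ← Nat.gcd_rec, Nat.gcd_comm]
  | case2 a b hbz =>
    simp only [ne_eq, not_not] at hbz
    subst hbz
    rw [pvGcdA]
    simp only [ne_eq, not_true_eq_false, dite_false, Int.gcd,
      Int.natAbs_zero, Nat.gcd_zero_right]
    omega

-- B's first loop: positivity, exit condition, and gcd * 2^k preserved
theorem pvGcdBShift_spec : ∀ (f : Nat) (a b : Int) (k : Nat), 0 < a → 0 < b → a.natAbs ≤ f →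
    0 < (pvGcdBShift f a b k).1 ∧ 0 < (pvGcdBShift f a b k).2.1 ∧
    ¬(2 ∣ (pvGcdBShift f a b k).1 ∧ 2 ∣ (pvGcdBShift f a b k).2.1) ∧
    Int.gcd (pvGcdBShift f a b k).1 (pvGcdBShift f a b k).2.1 * 2 ^ (pvGcdBShift f a b k).2.2
      = Int.gcd a b * 2 ^ k := by
  intro f
  induction f with
  | zero => intro a b k ha hb hf; omega
  | succ f ih =>
    intro a b k ha hb hf
    rw [pvGcdBShift]
    by_cases hc : PySem.Int.mod a 2 = 0 ∧ PySem.Int.mod b 2 = 0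
    · rw [if_pos hc]
      obtain ⟨hca, hcb⟩ := hc
      rw [PySem.Int.mod_eq_zero_iff_dvd] at hca hcb
      obtain ⟨x, hx⟩ := hca
      obtain ⟨y, hy⟩ := hcb
      have hdx : PySem.Int.floordiv a 2 = x := by
        rw [@PySem.Int.floordiv_eq_ediv_of_pos a 2 (by omega)]; omega
      have hdy : PySem.Int.floordiv b 2 = y := by
        rw [@PySem.Int.floordiv_eq_ediv_of_pos b 2 (by omega)]; omega
      rw [hdx, hdy]
      have hxpos : 0 < x := by omega
      have hypos : 0 < y := by omega
      have := ih x y (k + 1) hxpos hypos (by omega)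
      refine ⟨this.1, this.2.1, this.2.2.1, ?_⟩
      rw [this.2.2.2]
      have hg : Int.gcd a b = 2 * Int.gcd x y := by
        simp only [Int.gcd]
        have h1 : a.natAbs = 2 * x.natAbs := by omega
        have h2 : b.natAbs = 2 * y.natAbs := by omega
        rw [h1, h2, Nat.gcd_mul_left]
      rw [hg]; ring
    · rw [if_neg hc]
      refine ⟨ha, hb, ?_, rfl⟩
      intro ⟨h1, h2⟩
      exact hc ⟨(PySem.Int.mod_eq_zero_iff_dvd a 2).2 h1, (PySem.Int.mod_eq_zero_iff_dvd b 2).2 h2⟩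

-- B's main loop computes the gcd (invariant: both positive, not both even; fuel covers a + b)
theorem pvGcdBLoop_spec : ∀ (f : Nat) (a b : Int), 0 < a → 0 < b → ¬(2 ∣ a ∧ 2 ∣ b) →
    a.natAbs + b.natAbs ≤ f + 1 → pvGcdBLoop f a b = (Int.gcd a b : Int) := by
  intro f
  induction f with
  | zero => intro a b ha hb _ hf; omega
  | succ f ih =>
    intro a b ha hb hne hf
    rw [pvGcdBLoop]
    by_cases hab : a = b
    · subst hab
      rw [if_neg (by simp)]
      simp only [Int.gcd, Nat.gcd_self]
      omega
    · rw [if_pos hab]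
      by_cases hea : PySem.Int.mod a 2 = 0
      · rw [if_pos hea]
        rw [PySem.Int.mod_eq_zero_iff_dvd] at hea
        have hob : ¬ (2 ∣ b) := fun h => hne ⟨hea, h⟩
        obtain ⟨x, hx⟩ := hea
        have hdx : PySem.Int.floordiv a 2 = x := by
          rw [@PySem.Int.floordiv_eq_ediv_of_pos a 2 (by omega)]; omega
        rw [hdx, ih x b (by omega) hb (fun h => hob h.2) (by omega)]
        have hg : Nat.gcd a.natAbs b.natAbs = Nat.gcd x.natAbs b.natAbs := by
          have h1 : a.natAbs = 2 * x.natAbs := by omega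
          rw [h1, pvGcdOddCancelLeft x.natAbs b.natAbs (pvCoprimeTwoOfNotDvd b hob)]
        simp only [Int.gcd, hg]
      · rw [if_neg hea]
        rw [PySem.Int.mod_eq_zero_iff_dvd] at hea
        by_cases heb : PySem.Int.mod b 2 = 0
        · rw [if_pos heb]
          rw [PySem.Int.mod_eq_zero_iff_dvd] at heb
          obtain ⟨y, hy⟩ := heb
          have hdy : PySem.Int.floordiv b 2 = y := by
            rw [@PySem.Int.floordiv_eq_ediv_of_pos b 2 (by omega)]; omega
          rw [hdy, ih a y ha (by omega) (fun h => hea h.1) (by omega)]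
          have hg : Nat.gcd a.natAbs b.natAbs = Nat.gcd a.natAbs y.natAbs := by
            have h2 : b.natAbs = 2 * y.natAbs := by omega
            rw [h2, Nat.gcd_comm a.natAbs (2 * y.natAbs),
              pvGcdOddCancelLeft y.natAbs a.natAbs (pvCoprimeTwoOfNotDvd a hea),
              Nat.gcd_comm y.natAbs a.natAbs]
          simp only [Int.gcd, hg]
        · rw [if_neg heb]
          rw [PySem.Int.mod_eq_zero_iff_dvd] at heb
          by_cases hgt : a > b
          · rw [if_pos hgt]
            have hdvd : (2:Int) ∣ (a - b) := by omega
            obtain ⟨z, hz⟩ := hdvd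
            have hdz : PySem.Int.floordiv (a - b) 2 = z := by
              rw [@PySem.Int.floordiv_eq_ediv_of_pos (a-b) 2 (by omega)]; omega
            rw [hdz, ih z b (by omega) hb (fun h => heb h.2) (by omega)]
            have hg : Nat.gcd a.natAbs b.natAbs = Nat.gcd z.natAbs b.natAbs := by
              have h1 : (2 * z.natAbs : Nat) = a.natAbs - b.natAbs := by omega
              have h2 : b.natAbs ≤ a.natAbs := by omega
              rw [← pvGcdOddCancelLeft z.natAbs b.natAbs (pvCoprimeTwoOfNotDvd b heb), h1,
                Nat.gcd_comm (a.natAbs - b.natAbs) b.natAbs, Nat.gcd_sub_self_right h2,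
                Nat.gcd_comm b.natAbs a.natAbs]
            simp only [Int.gcd, hg]
          · rw [if_neg hgt]
            have hdvd : (2:Int) ∣ (b - a) := by omega
            obtain ⟨z, hz⟩ := hdvd
            have hdz : PySem.Int.floordiv (b - a) 2 = z := by
              rw [@PySem.Int.floordiv_eq_ediv_of_pos (b-a) 2 (by omega)]; omega
            rw [hdz, ih a z ha (by omega) (fun h => hea h.1) (by omega)]
            have hg : Nat.gcd a.natAbs b.natAbs = Nat.gcd a.natAbs z.natAbs := by
              have h1 : (2 * z.natAbs : Nat) = b.natAbs - a.natAbs := by omega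
              have h2 : a.natAbs ≤ b.natAbs := by omega
              rw [Nat.gcd_comm a.natAbs z.natAbs,
                ← pvGcdOddCancelLeft z.natAbs a.natAbs (pvCoprimeTwoOfNotDvd a hea), h1,
                Nat.gcd_comm (b.natAbs - a.natAbs) a.natAbs, Nat.gcd_sub_self_right h2]
            simp only [Int.gcd, hg]

-- B's inner gcd equals the gcd
theorem pvGcdB_eq (a b : Int) (ha : 0 < a) (hb : 0 < b) : pvGcdB a b = (Int.gcd a b : Int) := by
  rw [show pvGcdB a b = pvGcdBLoop ((pvGcdBShift (a.natAbs + b.natAbs) a b 0).1.natAbs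
      + (pvGcdBShift (a.natAbs + b.natAbs) a b 0).2.1.natAbs)
      (pvGcdBShift (a.natAbs + b.natAbs) a b 0).1 (pvGcdBShift (a.natAbs + b.natAbs) a b 0).2.1
      * 2 ^ (pvGcdBShift (a.natAbs + b.natAbs) a b 0).2.2 from rfl]
  obtain ⟨h1, h2, h3, h4⟩ := pvGcdBShift_spec (a.natAbs + b.natAbs) a b 0 ha hb (by omega)
  set s := pvGcdBShift (a.natAbs + b.natAbs) a b 0 with hs
  have hnd : ¬(2 ∣ s.1 ∧ 2 ∣ s.2.1) := h3
  rw [pvGcdBLoop_spec (s.1.natAbs + s.2.1.natAbs) s.1 s.2.1 h1 h2 hnd (by omega)]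
  have h5 : Int.gcd s.1 s.2.1 * 2 ^ s.2.2 = Int.gcd a b := by simpa using h4
  exact_mod_cast h5

-- ===== VERDICT (by name: the statement is the Claim_ definition above) =====
theorem aspect_ratio_string_spec : Claim_equal_aspect_ratio_string := by
  intro size _
  unfold Spec_aspect_ratio_string aspect_ratio_string aspect_ratio_string_alt
  by_cases hg : size.1 ≤ 0 ∨ size.2 ≤ 0
  · simp only [hg, if_true]
  · push_neg at hg
    simp only [if_neg (by push_neg; exact hg : ¬(size.1 ≤ 0 ∨ size.2 ≤ 0))]
    rw [pvGcdA_eq size.1 size.2 hg.1 hg.2.le, pvGcdB_eq size.1 size.2 hg.1 hg.2]
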